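-- pv_equiv track=rewrite | github.com/kobeomseok95/remind-algorithm | python/boj/gold/3078.py | solution
-- ===== SOURCE A (Python) =====
-- from collections import deque
--
-- def solution(K, friends_name_lengths):
--     lengths = [0 for _ in range(21)]
--     count = 0
--     for i in range(2, 21):
--         q = deque()
--         for name_length in friends_name_lengths:
--             q.append(name_length)
--             if len(q) > K + 1:
--                 length = q.popleft()
--                 if length == i:
--                     lengths[i] -= 1
--
--             if name_length == i:
--                 if lengths[i] > 0:
--                     count += lengths[i]
--                 lengths[i] += 1
--
--     return count
-- ===== SOURCE B (Python) =====
-- def solution(K, friends_name_lengths):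
--     if K <= 0:
--         return 0
--     counts = [0] * 21
--     count = 0
--     for j, length in enumerate(friends_name_lengths):
--         old = j - K - 1
--         if old >= 0:
--             prev = friends_name_lengths[old]
--             if 2 <= prev <= 20:
--                 counts[prev] -= 1
--         if 2 <= length <= 20:
--             count += counts[length]
--             counts[length] += 1
--     return count
-- ===== Notes on version B (the rewrite author's own statement) =====
-- stated objective: faster
-- what changed: A sweeps the whole list 19 times (once per name length 2..20), each sweep simulating a deque window; B makes a single sliding-window pass keeping a count array indexed by name length, adding the current window count of the incoming length and evicting the element that falls out of the window by index.
import Mathlib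
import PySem

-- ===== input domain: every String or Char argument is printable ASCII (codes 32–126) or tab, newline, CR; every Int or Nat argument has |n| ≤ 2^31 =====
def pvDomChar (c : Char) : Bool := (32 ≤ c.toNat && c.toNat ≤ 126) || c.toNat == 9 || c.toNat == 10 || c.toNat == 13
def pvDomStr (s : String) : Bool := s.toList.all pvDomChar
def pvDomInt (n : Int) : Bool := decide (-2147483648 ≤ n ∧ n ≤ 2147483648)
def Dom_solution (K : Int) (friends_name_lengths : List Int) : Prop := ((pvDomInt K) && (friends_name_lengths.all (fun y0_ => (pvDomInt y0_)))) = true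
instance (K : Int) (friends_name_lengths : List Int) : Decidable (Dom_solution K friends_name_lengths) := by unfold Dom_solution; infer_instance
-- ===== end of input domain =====

-- B replaces A's 19 deque sweeps (one per name length) by a single sliding-window pass
-- with a per-length count array; same return value on every input.

-- ===== PORT A =====
def solutionInnerStep (K i : Int) (s : List Int × List Int × Int) (name_length : Int) : List Int × List Int × Int :=
  let q := s.1 ++ [name_length]
  let lengths := s.2.1
  let count := s.2.2
  let ql : List Int × List Int :=
    if (q.length : Int) > K + 1 then
      -- q.popleft(): q is nonempty here (an element was just appended), so the [] arm is unreachable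
      match q with
      | [] => ([], lengths)
      | length :: qtl =>
        (qtl, if length = i then PySem.List.pySetD lengths i (PySem.List.pyGetD lengths i 0 - 1) else lengths)
    else (q, lengths)
  let q := ql.1
  let lengths := ql.2
  if name_length = i then
    let count := if PySem.List.pyGetD lengths i 0 > 0 then count + PySem.List.pyGetD lengths i 0 else count
    let lengths := PySem.List.pySetD lengths i (PySem.List.pyGetD lengths i 0 + 1)
    (q, lengths, count)
  else (q, lengths, count)

def solutionOuterStep (K : Int) (friends : List Int) (s : List Int × Int) (i : Int) : List Int × Int :=
  let r := friends.foldl (solutionInnerStep K i) ([], s.1, s.2)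
  (r.2.1, r.2.2)

def solution (K : Int) (friends_name_lengths : List Int) : Int :=
  let lengths : List Int := (List.range 21).map (fun _ => (0 : Int))
  ((PySem.List.pyRange 2 21 1).foldl (solutionOuterStep K friends_name_lengths) (lengths, 0)).2

-- ===== PORT B =====
def solutionAltStep (K : Int) (friends : List Int) (s : List Int × Int) (jl : Int × Int) : List Int × Int :=
  let counts := s.1
  let count := s.2
  let old := jl.1 - K - 1
  let counts :=
    if 0 ≤ old then
      let prev := PySem.List.pyGetD friends old 0
      if 2 ≤ prev ∧ prev ≤ 20 then PySem.List.pySetD counts prev (PySem.List.pyGetD counts prev 0 - 1) else counts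
    else counts
  if 2 ≤ jl.2 ∧ jl.2 ≤ 20 then
    (PySem.List.pySetD counts jl.2 (PySem.List.pyGetD counts jl.2 0 + 1), count + PySem.List.pyGetD counts jl.2 0)
  else (counts, count)

def solution_alt (K : Int) (friends_name_lengths : List Int) : Int :=
  if K ≤ 0 then 0
  else
    ((PySem.List.enumerate friends_name_lengths 0).foldl (solutionAltStep K friends_name_lengths) (List.replicate 21 0, 0)).2

-- ===== PRECONDITION & SPEC =====
def Spec_solution (K : Int) (friends_name_lengths : List Int) (out : Int) : Prop := out = solution_alt K friends_name_lengths
instance (K : Int) (friends_name_lengths : List Int) (out : Int) : Decidable (Spec_solution K friends_name_lengths out) := by unfold Spec_solution; infer_instance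

-- ===== CLAIM (what is proved, stated in full; the proofs are below) =====
def Claim_equal_solution : Prop := ∀ (K : Int) (friends_name_lengths : List Int), Dom_solution K friends_name_lengths → Spec_solution K friends_name_lengths (solution K friends_name_lengths)

-- ===== LEMMAS AND PROOFS =====

-- Abstract sliding window: pvWinStep pops the front when the window is full, then appends.
def pvWinStep (W : Nat) (q : List Int) (y : Int) : List Int × List Int :=
  let q1 := if W + 1 ≤ q.length then q.tail else q
  (q1, q1 ++ [y])

-- A's per-length pass, abstractly: contributions of pairs ending at each element equal to i.
def pvA (W : Nat) (i : Int) : List Int → List Int → Int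
  | _, [] => 0
  | q, y :: ys => (if y = i then (((pvWinStep W q y).1.count i : Nat) : Int) else 0) + pvA W i ((pvWinStep W q y).2) ys

-- B's single pass, abstractly.
def pvB (W : Nat) : List Int → List Int → Int
  | _, [] => 0
  | q, y :: ys => (if 2 ≤ y ∧ y ≤ 20 then (((pvWinStep W q y).1.count y : Nat) : Int) else 0) + pvB W ((pvWinStep W q y).2) ys

lemma pvGetSet_self (l : List Int) (i : Int) (v : Int) (h0 : 0 ≤ i) (hi : i < (l.length : Int)) :
    PySem.List.pyGetD (PySem.List.pySetD l i v) i 0 = v := by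
  rw [PySem.List.pySetD_of_nonneg _ _ h0,
    PySem.List.pyGetD_eq_getElem _ _ h0 (by simpa using hi), List.getElem_set]
  simp

lemma pvGetSet_ne (l : List Int) (i m v : Int) (h0 : 0 ≤ i) (hm0 : 0 ≤ m)
    (hm : m < (l.length : Int)) (hne : m ≠ i) :
    PySem.List.pyGetD (PySem.List.pySetD l i v) m 0 = PySem.List.pyGetD l m 0 := by
  rw [PySem.List.pySetD_of_nonneg _ _ h0,
    PySem.List.pyGetD_eq_getElem _ _ hm0 (by simpa using hm),
    PySem.List.pyGetD_eq_getElem _ _ hm0 hm, List.getElem_set, if_neg (by omega)]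

lemma pv_sum_zero (l : List Int) (c : Int → Int) (y : Int) (h : y ∉ l) :
    (l.map (fun i => if y = i then c i else 0)).sum = 0 := by
  induction l with
  | nil => simp
  | cons a l ih =>
    simp only [List.mem_cons, not_or] at h
    simp [if_neg h.1, ih h.2]

lemma pv_sum_single (l : List Int) (c : Int → Int) (y : Int) (h : l.Nodup) :
    (l.map (fun i => if y = i then c i else 0)).sum = if y ∈ l then c y else 0 := by
  induction l with
  | nil => simp
  | cons a l ih =>
    rcases List.nodup_cons.1 h with ⟨ha, hl⟩
    by_cases hy : y = a
    · subst hy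
      simp [pv_sum_zero l c y ha]
    · simp [ih hl, hy]

lemma pvB_eq_sum (W : Nat) : ∀ (ys q : List Int),
    pvB W q ys = ((PySem.List.pyRange 2 21 1).map (fun i => pvA W i q ys)).sum := by
  intro ys
  induction ys with
  | nil => intro q; simp [pvB, pvA]
  | cons y ys ih =>
    intro q
    have hsum := PySem.List.sum_map_add_int (PySem.List.pyRange 2 21 1)
      (fun i => if y = i then (((pvWinStep W q y).1.count i : Nat) : Int) else 0)
      (fun i => pvA W i ((pvWinStep W q y).2) ys)
    have hsingle := pv_sum_single (PySem.List.pyRange 2 21 1)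
      (fun i => (((pvWinStep W q y).1.count i : Nat) : Int)) y (PySem.List.nodup_pyRange_one 2 21)
    have hmem : (y ∈ PySem.List.pyRange 2 21 1) ↔ (2 ≤ y ∧ y ≤ 20) := by
      rw [PySem.List.mem_pyRange_one]; omega
    simp only [pvB, pvA, ih]
    rw [hsum, hsingle]
    by_cases hy : 2 ≤ y ∧ y ≤ 20
    · rw [if_pos hy, if_pos (hmem.2 hy)]
    · rw [if_neg hy, if_neg (fun h => hy (hmem.1 h))]

lemma pvCountCons (a : Int) (t : List Int) (i : Int) :
    ((a :: t).count i : Int) = (t.count i : Int) + if a = i then 1 else 0 := by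
  by_cases h : a = i <;> simp [h]

lemma pvCountAppend (t : List Int) (y i : Int) :
    ((t ++ [y]).count i : Int) = (t.count i : Int) + if y = i then 1 else 0 := by
  by_cases h : y = i <;> simp [List.count_append, h]

lemma pvWinLen (W : Nat) (q : List Int) (y : Int) (hq : q.length ≤ W + 1) :
    (pvWinStep W q y).2.length ≤ W + 1 := by
  unfold pvWinStep
  by_cases hfull : W + 1 ≤ q.length
  · simp only [if_pos hfull]
    simp [List.length_tail]
    omega
  · simp only [if_neg hfull]
    simp
    omega

-- one concrete inner step of A equals one abstract step (K = W ≥ 0)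
lemma pvInnerStep (K : Int) (W : Nat) (hK : K = (W : Int)) (i : Int) (hi0 : 0 ≤ i) (hi20 : i ≤ 20)
    (q l : List Int) (cnt y : Int) (hl : l.length = 21)
    (hc : PySem.List.pyGetD l i 0 = ((q.count i : Nat) : Int)) (hq : q.length ≤ W + 1) :
    ∃ l2, solutionInnerStep K i (q, l, cnt) y
        = ((pvWinStep W q y).2, l2,
            cnt + (if y = i then (((pvWinStep W q y).1.count i : Nat) : Int) else 0))
      ∧ l2.length = 21
      ∧ PySem.List.pyGetD l2 i 0 = (((pvWinStep W q y).2.count i : Nat) : Int)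
      ∧ ∀ m : Int, 0 ≤ m → m < 21 → m ≠ i → PySem.List.pyGetD l2 m 0 = PySem.List.pyGetD l m 0 := by
  have hil : i < (l.length : Int) := by rw [hl]; omega
  simp only [solutionInnerStep, pvWinStep]
  by_cases hfull : W + 1 ≤ q.length
  · have hqlen : q.length = W + 1 := le_antisymm hq hfull
    rcases q with _ | ⟨a, t⟩
    · simp at hqlen
    · have htlen : t.length = W := by simpa using hqlen
      simp only [List.cons_append, List.length_cons]
      rw [if_pos (show W + 1 ≤ t.length + 1 by omega)]
      rw [if_pos (show (((t ++ [y]).length + 1 : Nat) : Int) > K + 1 by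
        have hlen : (t ++ [y]).length = W + 1 := by simp [htlen]
        rw [hlen, hK]; push_cast; omega)]
      -- l1 := value of lengths after the pop branch
      have hc' : PySem.List.pyGetD (if a = i then PySem.List.pySetD l i (PySem.List.pyGetD l i 0 - 1) else l) i 0
          = ((t.count i : Nat) : Int) := by
        by_cases ha : a = i
        · rw [if_pos ha, pvGetSet_self l i _ hi0 hil, hc, pvCountCons, if_pos ha]
          ring
        · rw [if_neg ha, hc, pvCountCons, if_neg ha]
          ring
      have hl1 : (if a = i then PySem.List.pySetD l i (PySem.List.pyGetD l i 0 - 1) else l).length = 21 := by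
        by_cases ha : a = i <;> simp [ha, PySem.List.length_pySetD, hl]
      have hpres1 : ∀ m : Int, 0 ≤ m → m < 21 → m ≠ i →
          PySem.List.pyGetD (if a = i then PySem.List.pySetD l i (PySem.List.pyGetD l i 0 - 1) else l) m 0
            = PySem.List.pyGetD l m 0 := by
        intro m hm0 hm21 hmne
        by_cases ha : a = i
        · rw [if_pos ha, pvGetSet_ne l i m _ hi0 hm0 (by omega) hmne]
        · rw [if_neg ha]
      have hil1 : i < ((if a = i then PySem.List.pySetD l i (PySem.List.pyGetD l i 0 - 1) else l).length : Int) := by rw [hl1]; omega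
      by_cases hy : y = i
      · have hcnt : (if ((t.count i : Nat) : Int) > 0 then cnt + ((t.count i : Nat) : Int) else cnt)
            = cnt + ((t.count i : Nat) : Int) := by
          by_cases h0 : ((t.count i : Nat) : Int) > 0
          · rw [if_pos h0]
          · rw [if_neg h0]; omega
        refine ⟨PySem.List.pySetD (if a = i then PySem.List.pySetD l i (PySem.List.pyGetD l i 0 - 1) else l) i (PySem.List.pyGetD (if a = i then PySem.List.pySetD l i (PySem.List.pyGetD l i 0 - 1) else l) i 0 + 1), ?_, ?_, ?_, ?_⟩
        · dsimp only
          rw [if_pos hy, hc', hcnt, if_pos hy]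
          simp only [List.tail_cons]
        · simp [PySem.List.length_pySetD, hl1]
        · rw [pvGetSet_self (if a = i then PySem.List.pySetD l i (PySem.List.pyGetD l i 0 - 1) else l) i _ hi0 hil1, hc', pvCountAppend, if_pos hy]
          simp only [List.tail_cons]
        · intro m hm0 hm21 hmne
          rw [pvGetSet_ne (if a = i then PySem.List.pySetD l i (PySem.List.pyGetD l i 0 - 1) else l) i m _ hi0 hm0 (by omega) hmne]
          exact hpres1 m hm0 hm21 hmne
      · refine ⟨(if a = i then PySem.List.pySetD l i (PySem.List.pyGetD l i 0 - 1) else l), ?_, hl1, ?_, hpres1⟩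
        · dsimp only
          rw [if_neg hy, if_neg hy]
          simp
        · rw [hc', pvCountAppend, if_neg hy]
          simp only [List.tail_cons]
          ring
  · have hqlt : q.length < W + 1 := by omega
    rw [if_neg (show ¬ (((q ++ [y]).length : Nat) : Int) > K + 1 by
      have hlen : (q ++ [y]).length = q.length + 1 := by simp
      rw [hlen, hK]; push_cast; omega)]
    simp only [if_neg hfull]
    by_cases hy : y = i
    · have hcnt : (if ((q.count i : Nat) : Int) > 0 then cnt + ((q.count i : Nat) : Int) else cnt)
          = cnt + ((q.count i : Nat) : Int) := by
        by_cases h0 : ((q.count i : Nat) : Int) > 0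
        · rw [if_pos h0]
        · rw [if_neg h0]; omega
      refine ⟨PySem.List.pySetD l i (PySem.List.pyGetD l i 0 + 1), ?_, ?_, ?_, ?_⟩
      · dsimp only
        rw [if_pos hy, hc, if_pos hy, hcnt]
      · simp [PySem.List.length_pySetD, hl]
      · rw [pvGetSet_self l i _ hi0 hil, hc, pvCountAppend, if_pos hy]
      · intro m hm0 hm21 hmne
        rw [pvGetSet_ne l i m _ hi0 hm0 (by omega) hmne]
    · refine ⟨l, ?_, hl, ?_, fun m _ _ _ => rfl⟩
      · dsimp only
        rw [if_neg hy, if_neg hy]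
        simp
      · rw [hc, pvCountAppend, if_neg hy]
        ring

lemma pvInner (K : Int) (W : Nat) (hK : K = (W : Int)) (i : Int) (hi0 : 0 ≤ i) (hi20 : i ≤ 20) :
    ∀ (ys q l : List Int) (cnt : Int), l.length = 21 →
      PySem.List.pyGetD l i 0 = ((q.count i : Nat) : Int) → q.length ≤ W + 1 →
      ∃ q' l', ys.foldl (solutionInnerStep K i) (q, l, cnt) = (q', l', cnt + pvA W i q ys)
        ∧ l'.length = 21
        ∧ ∀ m : Int, 0 ≤ m → m < 21 → m ≠ i → PySem.List.pyGetD l' m 0 = PySem.List.pyGetD l m 0 := by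
  intro ys
  induction ys with
  | nil =>
    intro q l cnt hl hc hq
    exact ⟨q, l, by simp [pvA], hl, fun m _ _ _ => rfl⟩
  | cons y ys ih =>
    intro q l cnt hl hc hq
    obtain ⟨l2, hstep, hl2, hc2, hpres2⟩ := pvInnerStep K W hK i hi0 hi20 q l cnt y hl hc hq
    obtain ⟨q', l', hfold, hl', hpres⟩ := ih (pvWinStep W q y).2 l2
      (cnt + (if y = i then (((pvWinStep W q y).1.count i : Nat) : Int) else 0)) hl2 hc2
      (pvWinLen W q y hq)
    refine ⟨q', l', ?_, hl', fun m h0 h21 hne => (hpres m h0 h21 hne).trans (hpres2 m h0 h21 hne)⟩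
    rw [List.foldl_cons, hstep, hfold]
    simp only [pvA]
    rw [add_assoc]

-- outer loop of A accumulates the per-length sums (K = W ≥ 0)
lemma pvOuter (K : Int) (W : Nat) (hK : K = (W : Int)) (xs : List Int) :
    ∀ (n : Nat) (i : Int), i = 21 - (n : Int) → 2 ≤ i →
      ∀ (l : List Int) (cnt : Int), l.length = 21 →
        (∀ m : Int, i ≤ m → m < 21 → PySem.List.pyGetD l m 0 = 0) →
        ((PySem.List.pyRange i 21 1).foldl (solutionOuterStep K xs) (l, cnt)).2
          = cnt + ((PySem.List.pyRange i 21 1).map (fun i' => pvA W i' [] xs)).sum := by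
  intro n
  induction n with
  | zero =>
    intro i hi h2 l cnt hl hz
    rw [PySem.List.pyRange_one_eq_nil (by omega)]
    simp
  | succ m ih =>
    intro i hi h2 l cnt hl hz
    rw [PySem.List.pyRange_one_cons (by omega), List.foldl_cons]
    obtain ⟨q', l', hfold, hl', hpres⟩ := pvInner K W hK i (by omega) (by omega) xs [] l cnt hl
      (by rw [hz i le_rfl (by omega)]; simp) (by simp)
    have hstep : solutionOuterStep K xs (l, cnt) i = (l', cnt + pvA W i [] xs) := by
      unfold solutionOuterStep
      rw [hfold]
    rw [hstep,
      ih (i + 1) (by omega) (by omega) l' _ hl'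
        (fun m' hm' hm21 => by
          rw [hpres m' (by omega) hm21 (by omega)]
          exact hz m' (by omega) hm21),
      List.map_cons, List.sum_cons]
    ring

lemma pvBstepAdd (q1 c2 : List Int) (acc y : Int) (hlc2 : c2.length = 21)
    (hinv2 : ∀ m : Int, 2 ≤ m → m ≤ 20 → PySem.List.pyGetD c2 m 0 = ((q1.count m : Nat) : Int)) :
    ∃ c3, (if 2 ≤ y ∧ y ≤ 20 then
            (PySem.List.pySetD c2 y (PySem.List.pyGetD c2 y 0 + 1), acc + PySem.List.pyGetD c2 y 0)
          else (c2, acc))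
        = (c3, acc + (if 2 ≤ y ∧ y ≤ 20 then ((q1.count y : Nat) : Int) else 0))
      ∧ c3.length = 21
      ∧ ∀ m : Int, 2 ≤ m → m ≤ 20 →
          PySem.List.pyGetD c3 m 0 = (((q1 ++ [y]).count m : Nat) : Int) := by
  by_cases hy2 : 2 ≤ y ∧ y ≤ 20
  · refine ⟨PySem.List.pySetD c2 y (PySem.List.pyGetD c2 y 0 + 1), ?_, ?_, ?_⟩
    · rw [if_pos hy2, if_pos hy2, hinv2 y hy2.1 hy2.2]
    · simp [PySem.List.length_pySetD, hlc2]
    · intro m hm2 hm20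
      by_cases hmy : m = y
      · subst hmy
        rw [pvGetSet_self c2 m _ (by omega) (by rw [hlc2]; omega), hinv2 m hm2 hm20,
          pvCountAppend, if_pos rfl]
      · rw [pvGetSet_ne c2 y m _ (by omega) (by omega) (by rw [hlc2]; omega) hmy,
          hinv2 m hm2 hm20, pvCountAppend, if_neg (by omega)]
        ring
  · refine ⟨c2, ?_, hlc2, ?_⟩
    · rw [if_neg hy2, if_neg hy2]
      simp
    · intro m hm2 hm20
      have hmy : ¬ (y = m) := by intro h; exact hy2 (h ▸ ⟨hm2, hm20⟩)
      rw [hinv2 m hm2 hm20, pvCountAppend, if_neg hmy]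
      ring

-- B's concrete fold realises the abstract single pass (K = W ≥ 1)
lemma pvBfold (K : Int) (W : Nat) (hK : K = (W : Int)) (hW : 1 ≤ W) (xs : List Int) :
    ∀ (ys : List Int) (j : Nat) (c : List Int) (acc : Int),
      xs.drop j = ys → c.length = 21 →
      (∀ m : Int, 2 ≤ m → m ≤ 20 →
        PySem.List.pyGetD c m 0 = ((((xs.take j).drop (j - (W + 1))).count m : Nat) : Int)) →
      ((PySem.List.enumerate ys (j : Int)).foldl (solutionAltStep K xs) (c, acc)).2
        = acc + pvB W ((xs.take j).drop (j - (W + 1))) ys := by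
  intro ys
  induction ys with
  | nil =>
    intro j c acc _ _ _
    simp [pvB, PySem.List.enumerate]
  | cons y ys ih =>
    intro j c acc hdrop hlc hinv
    have hjlt : j < xs.length := by
      have hlen := congrArg List.length hdrop
      simp at hlen
      omega
    have hcd := List.getElem_cons_drop hjlt
    rw [hdrop] at hcd
    have hxj : xs[j] = y := (List.cons_eq_cons.1 hcd).1
    have hdrop' : xs.drop (j + 1) = ys := (List.cons_eq_cons.1 hcd).2
    have htake : (xs.take j).length = j := by simp; omega
    have hqlen : ((xs.take j).drop (j - (W + 1))).length = j - (j - (W + 1)) := by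
      simp [htake]
    have htakes : xs.take (j + 1) = xs.take j ++ [y] := by
      rw [List.take_add_one, List.getElem?_eq_getElem hjlt, hxj]
      rfl
    rw [PySem.List.enumerate_cons, List.foldl_cons,
      show (j : Int) + 1 = ((j + 1 : Nat) : Int) by push_cast; ring]
    by_cases hge : W + 1 ≤ j
    · -- the window is full: index j - (W+1) leaves it
      have hq0 : (xs.take j).drop (j - (W + 1)) ≠ [] := by
        intro h
        rw [h] at hqlen
        simp at hqlen
        omega
      obtain ⟨qa, qt, hqeq⟩ := List.exists_cons_of_ne_nil hq0
      have hja : j - (W + 1) < xs.length := by omega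
      have hqa : qa = xs[j - (W + 1)] := by
        have h0 : ((xs.take j).drop (j - (W + 1)))[0]? = some qa := by rw [hqeq]; rfl
        rw [List.getElem?_drop, Nat.add_zero, List.getElem?_take_of_lt (by omega),
          List.getElem?_eq_getElem hja] at h0
        exact (Option.some.injEq _ _ ▸ h0).symm
      have hqt : qt = (xs.take j).drop (j - W) := by
        have := congrArg List.tail hqeq
        rw [List.tail_drop] at this
        simp at this
        rw [show j - (W + 1) + 1 = j - W by omega] at this
        exact this.symm
      have hwin' : (xs.take (j + 1)).drop ((j + 1) - (W + 1)) = qt ++ [y] := by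
        rw [htakes, show (j + 1) - (W + 1) = j - W by omega,
          List.drop_append_of_le_length (by omega), hqt]
      have hold : (j : Int) - K - 1 = ((j - (W + 1) : Nat) : Int) := by rw [hK]; omega
      have hprev : PySem.List.pyGetD xs ((j : Int) - K - 1) 0 = qa := by
        rw [hold, PySem.List.pyGetD_natCast, List.getD_eq_getElem _ _ hja, hqa]
      have hwq : W + 1 ≤ ((xs.take j).drop (j - (W + 1))).length := by omega
      have hqtlen : qt.length = W := by
        have hl2 := congrArg List.length hqeq
        rw [hqlen] at hl2
        simp at hl2
        omega
      have hstep : solutionAltStep K xs (c, acc) ((j : Int), y)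
          = (if 2 ≤ y ∧ y ≤ 20 then
              (PySem.List.pySetD (if 2 ≤ qa ∧ qa ≤ 20 then PySem.List.pySetD c qa (PySem.List.pyGetD c qa 0 - 1) else c) y
                  (PySem.List.pyGetD (if 2 ≤ qa ∧ qa ≤ 20 then PySem.List.pySetD c qa (PySem.List.pyGetD c qa 0 - 1) else c) y 0 + 1),
                acc + PySem.List.pyGetD (if 2 ≤ qa ∧ qa ≤ 20 then PySem.List.pySetD c qa (PySem.List.pyGetD c qa 0 - 1) else c) y 0)
            else ((if 2 ≤ qa ∧ qa ≤ 20 then PySem.List.pySetD c qa (PySem.List.pyGetD c qa 0 - 1) else c), acc)) := by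
        simp only [solutionAltStep]
        rw [if_pos (show (0 : Int) ≤ (j : Int) - K - 1 by rw [hold]; positivity), hprev]
      have hlc2 : (if 2 ≤ qa ∧ qa ≤ 20 then PySem.List.pySetD c qa (PySem.List.pyGetD c qa 0 - 1) else c).length = 21 := by
        by_cases hpr : 2 ≤ qa ∧ qa ≤ 20
        · rw [if_pos hpr]; simp [PySem.List.length_pySetD, hlc]
        · rw [if_neg hpr]; exact hlc
      have hinv2 : ∀ m : Int, 2 ≤ m → m ≤ 20 →
          PySem.List.pyGetD (if 2 ≤ qa ∧ qa ≤ 20 then PySem.List.pySetD c qa (PySem.List.pyGetD c qa 0 - 1) else c) m 0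
            = ((qt.count m : Nat) : Int) := by
        intro m hm2 hm20
        have hq := hinv m hm2 hm20
        rw [hqeq, pvCountCons] at hq
        by_cases hpr : 2 ≤ qa ∧ qa ≤ 20
        · rw [if_pos hpr]
          by_cases hmqa : m = qa
          · subst hmqa
            rw [pvGetSet_self c m _ (by omega) (by rw [hlc]; omega), hq, if_pos rfl]
            ring
          · rw [pvGetSet_ne c qa m _ (by omega) (by omega) (by rw [hlc]; omega) hmqa, hq,
              if_neg (by omega)]
            ring
        · rw [if_neg hpr]
          have hmqa : m ≠ qa := by intro h; subst h; exact hpr ⟨hm2, hm20⟩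
          rw [hq, if_neg (by omega)]
          ring
      obtain ⟨c3, heq, hlc3, hinv3⟩ :=
        pvBstepAdd qt (if 2 ≤ qa ∧ qa ≤ 20 then PySem.List.pySetD c qa (PySem.List.pyGetD c qa 0 - 1) else c)
          acc y hlc2 hinv2
      rw [hstep, heq,
        ih (j + 1) c3 _ hdrop' hlc3 (fun m hm2 hm20 => by rw [hwin']; exact hinv3 m hm2 hm20),
        hwin', hqeq]
      simp only [pvB, pvWinStep]
      rw [if_pos (show W + 1 ≤ (qa :: qt).length by simp [hqtlen])]
      simp only [List.tail_cons]
      ring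
    · -- the window is not yet full: nothing leaves
      have hqe : (xs.take j).drop (j - (W + 1)) = xs.take j := by
        rw [show j - (W + 1) = 0 by omega, List.drop_zero]
      have hstep : solutionAltStep K xs (c, acc) ((j : Int), y)
          = (if 2 ≤ y ∧ y ≤ 20 then
              (PySem.List.pySetD c y (PySem.List.pyGetD c y 0 + 1), acc + PySem.List.pyGetD c y 0)
            else (c, acc)) := by
        simp only [solutionAltStep]
        rw [if_neg (show ¬ (0 : Int) ≤ (j : Int) - K - 1 by rw [hK]; omega)]
      have hinv2 : ∀ m : Int, 2 ≤ m → m ≤ 20 →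
          PySem.List.pyGetD c m 0 = (((xs.take j).count m : Nat) : Int) := by
        intro m hm2 hm20
        rw [hinv m hm2 hm20, hqe]
      have hwin' : (xs.take (j + 1)).drop ((j + 1) - (W + 1)) = xs.take j ++ [y] := by
        rw [show (j + 1) - (W + 1) = 0 by omega, List.drop_zero, htakes]
      obtain ⟨c3, heq, hlc3, hinv3⟩ := pvBstepAdd (xs.take j) c acc y hlc hinv2
      rw [hstep, heq,
        ih (j + 1) c3 _ hdrop' hlc3 (fun m hm2 hm20 => by rw [hwin']; exact hinv3 m hm2 hm20),
        hwin', hqe]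
      simp only [pvB, pvWinStep]
      rw [if_neg (show ¬ W + 1 ≤ (xs.take j).length by rw [htake]; omega)]
      ring

lemma pvB_zero : ∀ (ys q : List Int), q.length ≤ 1 → pvB 0 q ys = 0 := by
  intro ys
  induction ys with
  | nil => intro q _; simp [pvB]
  | cons y ys ih =>
    intro q hq
    have h1 : (if 1 ≤ q.length then q.tail else q) = [] := by
      rcases q with _ | ⟨a, t⟩
      · simp
      · simp at hq; simp [hq]
    simp only [pvB, pvWinStep, Nat.zero_add, h1]
    simp [ih [y] (by simp)]

lemma pvSetSet_self (l : List Int) (i : Int) (a : Int) (h0 : 0 ≤ i) (hi : i < (l.length : Int))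
    (hv : PySem.List.pyGetD l i 0 = 0) :
    PySem.List.pySetD (PySem.List.pySetD l i a) i 0 = l := by
  rw [PySem.List.pySetD_of_nonneg _ _ h0, PySem.List.pySetD_of_nonneg _ _ h0, List.set_set]
  have hv' : l[i.toNat] = 0 := by rw [PySem.List.pyGetD_eq_getElem _ _ h0 hi] at hv; exact hv
  rw [← hv', List.set_getElem_self]

-- for K < 0 each inner pass of A is a no-op
lemma pvNegInner (K : Int) (hK : K < 0) (i : Int) (hi0 : 0 ≤ i) (hi : i < 21) :
    ∀ (ys l : List Int) (cnt : Int), l.length = 21 → PySem.List.pyGetD l i 0 = 0 →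
      ys.foldl (solutionInnerStep K i) ([], l, cnt) = ([], l, cnt) := by
  intro ys
  induction ys with
  | nil => intro l cnt _ _; rfl
  | cons y ys ih =>
    intro l cnt hl hz
    have hil : i < (l.length : Int) := by rw [hl]; exact_mod_cast hi
    have hstep : solutionInnerStep K i ([], l, cnt) y = ([], l, cnt) := by
      unfold solutionInnerStep
      simp only [List.nil_append, List.length_cons, List.length_nil]
      rw [if_pos (show ((0 + 1 : Nat) : Int) > K + 1 by push_cast; omega)]
      by_cases hy : y = i
      · rw [if_pos hy]
        simp only [hy, if_true]
        rw [hz]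
        rw [pvGetSet_self l i (0 - 1) hi0 hil]
        rw [if_neg (by omega)]
        rw [show (0 : Int) - 1 + 1 = 0 by ring, pvSetSet_self l i (0 - 1) hi0 hil hz]
      · rw [if_neg hy, if_neg hy]
    rw [List.foldl_cons, hstep]
    exact ih l cnt hl hz

lemma pvNegOuter (K : Int) (hK : K < 0) (xs : List Int) :
    ∀ (is : List Int) (l : List Int) (cnt : Int), l.length = 21 →
      (∀ i ∈ is, 0 ≤ i ∧ i < 21) →
      (∀ m : Int, 0 ≤ m → m < 21 → PySem.List.pyGetD l m 0 = 0) →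
      (is.foldl (solutionOuterStep K xs) (l, cnt)) = (l, cnt) := by
  intro is
  induction is with
  | nil => intro l cnt _ _ _; rfl
  | cons i is ih =>
    intro l cnt hl his hz
    have hi := his i (by simp)
    have hstep : solutionOuterStep K xs (l, cnt) i = (l, cnt) := by
      unfold solutionOuterStep
      rw [pvNegInner K hK i hi.1 hi.2 xs l cnt hl (hz i hi.1 hi.2)]
    rw [List.foldl_cons, hstep]
    exact ih l cnt hl (fun j hj => his j (by simp [hj])) hz

lemma pvInit (m : Int) (h0 : 0 ≤ m) (h : m < 21) :
    PySem.List.pyGetD ((List.range 21).map (fun _ => (0 : Int))) m 0 = 0 := by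
  rw [PySem.List.pyGetD_eq_getElem _ _ h0 (by simpa using h)]
  simp only [List.getElem_map]

lemma pvInitRep (m : Int) (h0 : 0 ≤ m) (h : m < 21) :
    PySem.List.pyGetD (List.replicate 21 (0 : Int)) m 0 = 0 := by
  rw [PySem.List.pyGetD_eq_getElem _ _ h0 (by simpa using h)]
  simp only [List.getElem_replicate]

lemma pvSolutionDef (K : Int) (xs : List Int) : solution K xs
    = ((PySem.List.pyRange 2 21 1).foldl (solutionOuterStep K xs)
        ((List.range 21).map (fun _ => (0 : Int)), 0)).2 := rfl

-- ===== VERDICT (by name: the statement is the Claim_ definition above) =====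
theorem solution_spec : Claim_equal_solution := by
  intro K xs _
  unfold Spec_solution solution_alt
  rw [pvSolutionDef]
  rcases lt_trichotomy K 0 with hK | hK | hK
  · rw [if_pos (le_of_lt hK)]
    rw [pvNegOuter K hK xs (PySem.List.pyRange 2 21 1) _ 0 (by simp)
      (fun i hi => by rw [PySem.List.mem_pyRange_one] at hi; omega)
      (fun m h0 h => pvInit m h0 h)]
  · subst hK
    rw [if_pos le_rfl]
    have h := pvOuter 0 0 (by simp) xs 19 2 (by norm_num) (by norm_num)
      ((List.range 21).map (fun _ => (0 : Int))) 0 (by simp)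
      (fun m hm h => pvInit m (by omega) h)
    rw [h, ← pvB_eq_sum, pvB_zero xs [] (by simp)]
    simp
  · have h0K : 0 ≤ K := le_of_lt hK
    have hK' : K = (K.toNat : Int) := (Int.toNat_of_nonneg h0K).symm
    have hW : 1 ≤ K.toNat := by omega
    rw [if_neg (by omega)]
    have hA := pvOuter K K.toNat hK' xs 19 2 (by norm_num) (by norm_num)
      ((List.range 21).map (fun _ => (0 : Int))) 0 (by simp)
      (fun m hm h => pvInit m (by omega) h)
    have hB := pvBfold K K.toNat hK' hW xs xs 0 (List.replicate 21 0) 0 (by simp) (by simp)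
      (fun m hm2 hm20 => by simpa using pvInitRep m (by omega) (by omega))
    rw [hA, ← pvB_eq_sum]
    rw [show ((0 : Nat) : Int) = (0 : Int) by simp] at hB
    rw [hB]
    simp
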